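-- pv_equiv track=rewrite | github.com/wetbadger/bryology | bry2.py | build_taxonomic_hierarchy
-- ===== SOURCE A (Python) =====
-- def build_taxonomic_hierarchy(species_data):
--     """
--     Builds a hierarchical data structure for taxonomic relationships.
--     """
--     taxonomic_hierarchy = {}
--
--     for species in species_data:
--         class_name = species.get("class", "Unknown")
--         order_name = species.get("order", "Unknown")
--         family_name = species.get("family", "Unknown")
--         genus_name = species.get("genus", "Unknown")
--
--         # Add class if not already present
--         if class_name not in taxonomic_hierarchy:
--             taxonomic_hierarchy[class_name] = {}
--
--         # Add order if not already present
--         if order_name not in taxonomic_hierarchy[class_name]: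
--             taxonomic_hierarchy[class_name][order_name] = {}
--
--         # Add family if not already present
--         if family_name not in taxonomic_hierarchy[class_name][order_name]:
--             taxonomic_hierarchy[class_name][order_name][family_name] = {}
--
--         # Add genus if not already present
--         if genus_name not in taxonomic_hierarchy[class_name][order_name][family_name]:
--             taxonomic_hierarchy[class_name][order_name][family_name][genus_name] = {}
--
--     return taxonomic_hierarchy
-- ===== SOURCE B (Python) =====
-- def build_taxonomic_hierarchy(species_data):
--     """Group-by re-implementation: extract the rank tuple of every species once,
--     then build the hierarchy top-down by recursive grouping on each rank."""
--     ranks = ("class", "order", "family", "genus")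
--     rows = [tuple(sp.get(r, "Unknown") for r in ranks) for sp in species_data]
--
--     def group(rows, depth):
--         if depth == len(ranks):
--             return {}
--         return {key: group([row for row in rows if row[depth] == key], depth + 1)
--                 for key in dict.fromkeys(row[depth] for row in rows)}
--
--     return group(rows, 0)
-- ===== Notes on version B (the rewrite author's own statement) =====
-- stated objective: alternative
-- what changed: A inserts each species path into the nested dict incrementally with four unrolled membership-check-and-assign blocks; B extracts each species' rank tuple once and builds the hierarchy top-down by recursive grouping (ordered dedup of the keys at each rank, then grouping the matching rows one level down).
import Mathlib
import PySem

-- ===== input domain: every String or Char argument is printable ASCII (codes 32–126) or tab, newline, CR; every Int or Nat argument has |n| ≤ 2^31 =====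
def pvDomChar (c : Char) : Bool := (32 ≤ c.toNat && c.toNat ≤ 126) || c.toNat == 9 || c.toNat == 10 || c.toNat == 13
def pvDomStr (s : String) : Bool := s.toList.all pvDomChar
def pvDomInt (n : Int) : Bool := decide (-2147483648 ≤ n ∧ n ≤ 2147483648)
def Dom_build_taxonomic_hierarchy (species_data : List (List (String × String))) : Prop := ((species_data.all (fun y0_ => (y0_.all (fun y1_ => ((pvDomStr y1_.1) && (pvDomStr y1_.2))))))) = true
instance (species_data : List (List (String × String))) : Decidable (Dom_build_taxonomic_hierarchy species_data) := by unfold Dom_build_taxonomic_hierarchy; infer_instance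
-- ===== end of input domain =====

-- B rebuilds the hierarchy by recursive grouping on the rank tuples instead of A's four unrolled
-- insert-if-absent dict blocks; equality of the return values is proved below (alternative decomposition).
-- Dicts are nested association lists (type convention). The three helpers below are the Python dict
-- operations the two programs use, on such lists, exact because a Python dict's keys are unique:
-- `k in d` (amem), `d.get(k, dflt)` / `d[k]` when k is present (agetD, first match), and the
-- assignment `d[k] = v` (aset: overwrite in place, new keys append).

def amem {α : Type} (k : String) (d : List (String × α)) : Bool := d.any (fun p => p.1 == k)
def agetD {α : Type} (d : List (String × α)) (k : String) (dflt : α) : α :=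
  match d with
  | [] => dflt
  | (k', v) :: rest => if k' == k then v else agetD rest k dflt
def aset {α : Type} (d : List (String × α)) (k : String) (v : α) : List (String × α) :=
  match d with
  | [] => [(k, v)]
  | (k', w) :: rest => if k' == k then (k, v) :: rest else (k', w) :: aset rest k v
-- ===== PORT A =====
-- literal transliteration of A: one fold over species_data; each iteration runs A's four
-- statements in order, rebuilding the assignment path `taxonomic_hierarchy[x]...[y] = {}` with aset.
def build_taxonomic_hierarchy (species_data : List (List (String × String))) : List (String × List (String × List (String × List (String × List (String × String))))) :=
  species_data.foldl (fun h species =>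
    let class_name := agetD species "class" "Unknown"
    let order_name := agetD species "order" "Unknown"
    let family_name := agetD species "family" "Unknown"
    let genus_name := agetD species "genus" "Unknown"
    let h := if amem class_name h then h else aset h class_name []
    let h := if amem order_name (agetD h class_name []) then h
             else aset h class_name (aset (agetD h class_name []) order_name [])
    let h := if amem family_name (agetD (agetD h class_name []) order_name []) then h
             else aset h class_name (aset (agetD h class_name [])
                    order_name (aset (agetD (agetD h class_name []) order_name []) family_name []))
    let h := if amem genus_name (agetD (agetD (agetD h class_name []) order_name []) family_name []) then h
             else aset h class_name (aset (agetD h class_name [])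
                    order_name (aset (agetD (agetD h class_name []) order_name [])
                      family_name (aset (agetD (agetD (agetD h class_name []) order_name []) family_name []) genus_name [])))
    h) []


-- ===== PORT B =====
-- transliteration of Source B: rank tuples first, then Source B's generic `group(rows, depth)`.
-- `group` is the polymorphic grouping step `grp` (ordered dedup of the keys at this depth, then
-- the next depth on the matching rows); the nested result types differ per depth, so Lean needs
-- one typed instance per depth (hier1..hier4), hier4's `next` being the constant {} of the base case.
def grp {β γ : Type} (next : List β → γ) (rows : List (String × β)) : List (String × γ) :=
  (PySem.List.dedup (rows.map (·.1))).map
    (fun k => (k, next ((rows.filter (fun r => r.1 == k)).map (·.2))))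

def hier4 : List (String × Unit) → List (String × List (String × String)) :=
  grp (fun _ => ([] : List (String × String)))
def hier3 : List (String × String × Unit) → List (String × List (String × List (String × String))) :=
  grp hier4
def hier2 : List (String × String × String × Unit) → List (String × List (String × List (String × List (String × String)))) :=
  grp hier3
def hier1 : List (String × String × String × String × Unit) → List (String × List (String × List (String × List (String × List (String × String))))) :=
  grp hier2

def build_taxonomic_hierarchy_alt (species_data : List (List (String × String))) : List (String × List (String × List (String × List (String × List (String × String))))) :=
  hier1 (species_data.map (fun sp =>
    (agetD sp "class" "Unknown", agetD sp "order" "Unknown",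
     agetD sp "family" "Unknown", agetD sp "genus" "Unknown", ())))


-- DecidableEq of the nested result type, built level by level (plain instance search times out on it)
def dEq2 : DecidableEq (List (String × String)) := by infer_instance
def dEq3 : DecidableEq (List (String × List (String × String))) := @instDecidableEqList _ (@instDecidableEqProd _ _ _ dEq2)
def dEq4 : DecidableEq (List (String × List (String × List (String × String)))) := @instDecidableEqList _ (@instDecidableEqProd _ _ _ dEq3)
def dEq5 : DecidableEq (List (String × List (String × List (String × List (String × String))))) := @instDecidableEqList _ (@instDecidableEqProd _ _ _ dEq4)
def dEq6 : DecidableEq (List (String × List (String × List (String × List (String × List (String × String)))))) := @instDecidableEqList _ (@instDecidableEqProd _ _ _ dEq5)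

-- ===== PRECONDITION & SPEC =====
def Spec_build_taxonomic_hierarchy (species_data : List (List (String × String))) (out : List (String × List (String × List (String × List (String × List (String × String)))))) : Prop := out = build_taxonomic_hierarchy_alt species_data
instance (species_data : List (List (String × String))) (out : List (String × List (String × List (String × List (String × List (String × String)))))) : Decidable (Spec_build_taxonomic_hierarchy species_data out) := by unfold Spec_build_taxonomic_hierarchy; exact dEq6 out (build_taxonomic_hierarchy_alt species_data)

-- ===== CLAIM (what is proved, stated in full; the proofs are below) =====
def Claim_equal_build_taxonomic_hierarchy : Prop := ∀ (species_data : List (List (String × String))), Dom_build_taxonomic_hierarchy species_data → Spec_build_taxonomic_hierarchy species_data (build_taxonomic_hierarchy species_data)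

-- ===== LEMMAS AND PROOFS =====

theorem amem_grp {β γ : Type} (next : List β → γ) (rows : List (String × β)) (k : String) :
    amem k (grp next rows) = decide (k ∈ rows.map (·.1)) := by
  simp only [grp, amem, List.any_map]
  simp [Function.comp_def]
  rw [Bool.eq_iff_iff]
  simp [List.any_eq_true, PySem.Set.mem_ofList]

theorem agetD_map_nodup {δ : Type} (ks : List String) (F : String → δ) (k : String) (dflt : δ)
    (hnd : ks.Nodup) (hk : k ∈ ks) : agetD (ks.map (fun x => (x, F x))) k dflt = F k := by
  induction ks with
  | nil => simp at hk
  | cons a tl ih =>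
    by_cases hak : a = k
    · subst hak; simp [agetD]
    · have hk' : k ∈ tl := by
        rcases List.mem_cons.mp hk with h | h
        · exact absurd h.symm hak
        · exact h
      simp [agetD, hak, ih hnd.of_cons hk']

theorem aset_map_nodup {δ : Type} (ks : List String) (F : String → δ) (k : String) (v : δ)
    (hnd : ks.Nodup) (hk : k ∈ ks) :
    aset (ks.map (fun x => (x, F x))) k v = ks.map (fun x => (x, if x = k then v else F x)) := by
  induction ks with
  | nil => simp at hk
  | cons a tl ih =>
    by_cases hak : a = k
    · subst hak
      simp [aset]
      intro x hx hxk
      exact absurd (hxk ▸ hx) (List.nodup_cons.mp hnd).1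
    · have hk' : k ∈ tl := by
        rcases List.mem_cons.mp hk with h | h
        · exact absurd h.symm hak
        · exact h
      simp [aset, hak]
      exact ih hnd.of_cons hk'

theorem nodup_dedup' (xs : List String) : (PySem.List.dedup xs).Nodup := by
  simp only [PySem.List.dedup_eq_ofList]
  exact PySem.Set.nodup_ofList xs

theorem agetD_grp_of_mem {β γ : Type} (next : List β → γ) (rows : List (String × β)) (k : String)
    (h : k ∈ rows.map (·.1)) (dflt : γ) :
    agetD (grp next rows) k dflt = next ((rows.filter (fun r => r.1 == k)).map (·.2)) := by
  unfold grp
  exact agetD_map_nodup _ _ _ _ (nodup_dedup' _) (by simpa [PySem.List.mem_dedup] using h)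

theorem dedup_append_singleton (xs : List String) (x : String) :
    PySem.List.dedup (xs ++ [x]) =
      if x ∈ xs then PySem.List.dedup xs else PySem.List.dedup xs ++ [x] := by
  simp only [PySem.List.dedup_eq_ofList, PySem.Set.ofList_append_singleton]
  by_cases h : x ∈ xs
  · rw [PySem.Set.add_of_mem (by simpa [PySem.Set.mem_ofList] using h)]; simp [h]
  · rw [PySem.Set.add_of_not_mem (by simpa [PySem.Set.mem_ofList] using h)]; simp [h]

theorem grp_append {β γ : Type} (next : List β → γ) (rows : List (String × β)) (t : String × β) :
    grp next (rows ++ [t]) =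
      if t.1 ∈ rows.map (·.1)
      then aset (grp next rows) t.1 (next (((rows.filter (fun r => r.1 == t.1)).map (·.2)) ++ [t.2]))
      else grp next rows ++ [(t.1, next [t.2])] := by
  unfold grp
  rw [List.map_append, show (List.map (fun x => x.1) [t] : List String) = [t.1] by simp,
      dedup_append_singleton]
  by_cases h : t.1 ∈ rows.map (·.1)
  · simp only [h, if_true]
    rw [aset_map_nodup _ _ _ _ (nodup_dedup' _) (by simpa [PySem.List.mem_dedup] using h)]
    apply List.map_congr_left
    intro k hk
    by_cases hkt : k = t.1
    · subst hkt
      simp [List.filter_append]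
    · have hkt' : ¬ t.1 = k := fun e => hkt e.symm
      simp [List.filter_append, hkt, hkt']
  · simp only [h, if_false, List.map_append]
    congr 1
    · apply List.map_congr_left
      intro k hk
      have hkt : ¬ t.1 = k := by
        intro e; exact h (by simpa [PySem.List.mem_dedup, e] using hk)
      simp [List.filter_append, hkt]
    · have : rows.filter (fun r => r.1 == t.1) = [] := by
        rw [List.filter_eq_nil_iff]
        intro a ha e
        apply h
        simp only [List.mem_map]
        exact ⟨a, ha, by simpa using e⟩
      simp [List.filter_append, this]

theorem agetD_aset_self {α : Type} (d : List (String × α)) (k : String) (v : α) (dflt : α) :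
    agetD (aset d k v) k dflt = v := by
  induction d with
  | nil => simp [aset, agetD]
  | cons p rest ih =>
    obtain ⟨k', w⟩ := p
    by_cases h : k' = k <;> simp [aset, agetD, h, ih]

theorem aset_aset_self {α : Type} (d : List (String × α)) (k : String) (v w : α) :
    aset (aset d k v) k w = aset d k w := by
  induction d with
  | nil => simp [aset]
  | cons p rest ih =>
    obtain ⟨k', x⟩ := p
    by_cases h : k' = k <;> simp [aset, h, ih]

theorem amem_aset_self {α : Type} (d : List (String × α)) (k : String) (v : α) :
    amem k (aset d k v) = true := by
  induction d with
  | nil => simp [aset, amem]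
  | cons p rest ih =>
    obtain ⟨k', x⟩ := p
    by_cases h : k' = k <;> simp_all [aset, amem]

theorem aset_getD_self {α : Type} (d : List (String × α)) (k : String) (dflt : α)
    (h : amem k d = true) : aset d k (agetD d k dflt) = d := by
  induction d with
  | nil => simp [amem] at h
  | cons p rest ih =>
    obtain ⟨k', x⟩ := p
    by_cases hk : k' = k
    · simp [aset, agetD, hk]
    · have h' : amem k rest = true := by simpa [amem, hk] using h
      simp [aset, agetD, hk, ih h']

theorem aset_of_not_mem {α : Type} (d : List (String × α)) (k : String) (v : α)
    (h : amem k d = false) : aset d k v = d ++ [(k, v)] := by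
  induction d with
  | nil => simp [aset]
  | cons p rest ih =>
    obtain ⟨k', x⟩ := p
    by_cases hk : k' = k
    · simp [amem, hk] at h
    · have h' : amem k rest = false := by simpa [amem, hk] using h
      simp [aset, hk, ih h']

-- generic: one setdefault-then-update-in-place step on a grouped level
theorem grp_step {β δ : Type} (next : List β → List (String × δ))
    (insn : List (String × δ) → β → List (String × δ))
    (hnil : next [] = [])
    (hins : ∀ rs x, insn (next rs) x = next (rs ++ [x]))
    (rows : List (String × β)) (k : String) (x : β) :
    (let d1 := if amem k (grp next rows) then grp next rows
               else aset (grp next rows) k ([] : List (String × δ))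
     aset d1 k (insn (agetD d1 k ([] : List (String × δ))) x)) = grp next (rows ++ [(k, x)]) := by
  rw [grp_append]
  by_cases h : k ∈ rows.map (·.1)
  · have hm : amem k (grp next rows) = true := by simp [amem_grp, h]
    simp only [hm, if_true, h]
    rw [agetD_grp_of_mem _ _ _ h, hins]
  · have hm : amem k (grp next rows) = false := by simp [amem_grp, h]
    simp only [hm, Bool.false_eq_true, if_false, h]
    rw [agetD_aset_self, aset_aset_self, show ([] : List (String × δ)) = next [] from hnil.symm,
        hins, aset_of_not_mem _ _ _ hm]
    simp

def ins4 (d : List (String × List (String × String))) (g : String) :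
    List (String × List (String × String)) :=
  if amem g d then d else aset d g []
def ins3 (d : List (String × List (String × List (String × String)))) (f g : String) :
    List (String × List (String × List (String × String))) :=
  let d1 := if amem f d then d else aset d f []
  aset d1 f (ins4 (agetD d1 f []) g)
def ins2 (d : List (String × List (String × List (String × List (String × String))))) (o f g : String) :
    List (String × List (String × List (String × List (String × String)))) :=
  let d1 := if amem o d then d else aset d o []
  aset d1 o (ins3 (agetD d1 o []) f g)
def ins1 (h : List (String × List (String × List (String × List (String × List (String × String)))))) (c o f g : String) :
    List (String × List (String × List (String × List (String × List (String × String))))) :=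
  let h1 := if amem c h then h else aset h c []
  aset h1 c (ins2 (agetD h1 c []) o f g)

theorem ins4_hier (rs : List (String × Unit)) (g : String) :
    ins4 (hier4 rs) g = hier4 (rs ++ [(g, ())]) := by
  unfold ins4 hier4
  rw [grp_append]
  by_cases h : g ∈ rs.map (·.1)
  · have hm : amem g (grp (fun _ => ([] : List (String × String))) rs) = true := by
      simp [amem_grp, h]
    simp only [hm, if_true, h]
    have hv : agetD (grp (fun (_ : List Unit) => ([] : List (String × String))) rs) g [] = [] :=
      agetD_grp_of_mem (fun (_ : List Unit) => ([] : List (String × String))) rs g h []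
    have hd := aset_getD_self (grp (fun (_ : List Unit) => ([] : List (String × String))) rs) g [] hm
    rw [hv] at hd
    exact hd.symm
  · have hm : amem g (grp (fun _ => ([] : List (String × String))) rs) = false := by
      simp [amem_grp, h]
    simp only [hm, Bool.false_eq_true, if_false, h]
    exact aset_of_not_mem _ _ _ hm

theorem ins3_hier (rs : List (String × String × Unit)) (f g : String) :
    ins3 (hier3 rs) f g = hier3 (rs ++ [(f, (g, ()))]) := by
  unfold ins3 hier3
  exact grp_step hier4 (fun e x => ins4 e x.1) rfl
    (fun rs' x => by obtain ⟨a, ⟨⟩⟩ := x; exact ins4_hier rs' a) rs f (g, ())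

theorem ins2_hier (rs : List (String × String × String × Unit)) (o f g : String) :
    ins2 (hier2 rs) o f g = hier2 (rs ++ [(o, (f, (g, ())))]) := by
  unfold ins2 hier2
  exact grp_step hier3 (fun e x => ins3 e x.1 x.2.1) rfl
    (fun rs' x => by obtain ⟨a, b, ⟨⟩⟩ := x; exact ins3_hier rs' a b) rs o (f, (g, ()))

theorem ins1_hier (rs : List (String × String × String × String × Unit)) (c o f g : String) :
    ins1 (hier1 rs) c o f g = hier1 (rs ++ [(c, (o, (f, (g, ()))))]) := by
  unfold ins1 hier1
  exact grp_step hier2 (fun e x => ins2 e x.1 x.2.1 x.2.2.1) rfl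
    (fun rs' x => by obtain ⟨a, b, c', ⟨⟩⟩ := x; exact ins2_hier rs' a b c') rs c (o, (f, (g, ())))

theorem amem_nil {α : Type} (k : String) : amem k ([] : List (String × α)) = false := rfl

theorem tail_eq (h1 : List (String × List (String × List (String × List (String × List (String × String)))))) (c o f g : String)
    (hm : amem c h1 = true) :
    (let h2 := if amem o (agetD h1 c []) then h1 else aset h1 c (aset (agetD h1 c []) o [])
     let h3 := if amem f (agetD (agetD h2 c []) o []) then h2
               else aset h2 c (aset (agetD h2 c []) o (aset (agetD (agetD h2 c []) o []) f []))
     if amem g (agetD (agetD (agetD h3 c []) o []) f []) then h3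
     else aset h3 c (aset (agetD h3 c []) o (aset (agetD (agetD h3 c []) o []) f
            (aset (agetD (agetD (agetD h3 c []) o []) f []) g [])))) =
    aset h1 c (ins2 (agetD h1 c []) o f g) := by
  simp only [ins2, ins3, ins4]
  by_cases b2 : amem o (agetD h1 c [])
  · simp only [b2, if_true]
    by_cases b3 : amem f (agetD (agetD h1 c []) o [])
    · simp only [b3, if_true]
      by_cases b4 : amem g (agetD (agetD (agetD h1 c []) o []) f [])
      · simp only [b4, if_true]
        rw [aset_getD_self _ _ _ b3, aset_getD_self _ _ _ b2, aset_getD_self _ _ _ hm]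
      · simp only [b4, Bool.false_eq_true, if_false]
    · simp only [b3, Bool.false_eq_true, if_false, agetD_aset_self, aset_aset_self,
        amem_nil]
  · simp only [b2, Bool.false_eq_true, if_false, agetD_aset_self, aset_aset_self,
      amem_nil]


-- ins1..ins4: A's loop body restructured one nesting level at a time; grp_step/ins*_hier
-- transport one such step through B's grouped levels, tail_eq/step_eq relate them to A's flat body.
theorem step_eq (h : List (String × List (String × List (String × List (String × List (String × String)))))) (sp : List (String × String)) :
    (fun h species =>
      let class_name := agetD species "class" "Unknown"
      let order_name := agetD species "order" "Unknown"
      let family_name := agetD species "family" "Unknown"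
      let genus_name := agetD species "genus" "Unknown"
      let h := if amem class_name h then h else aset h class_name []
      let h := if amem order_name (agetD h class_name []) then h
               else aset h class_name (aset (agetD h class_name []) order_name [])
      let h := if amem family_name (agetD (agetD h class_name []) order_name []) then h
               else aset h class_name (aset (agetD h class_name [])
                      order_name (aset (agetD (agetD h class_name []) order_name []) family_name []))
      let h := if amem genus_name (agetD (agetD (agetD h class_name []) order_name []) family_name []) then h
               else aset h class_name (aset (agetD h class_name [])
                      order_name (aset (agetD (agetD h class_name []) order_name [])
                        family_name (aset (agetD (agetD (agetD h class_name []) order_name []) family_name []) genus_name [])))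
      h) h sp
    = ins1 h (agetD sp "class" "Unknown") (agetD sp "order" "Unknown")
        (agetD sp "family" "Unknown") (agetD sp "genus" "Unknown") := by
  have hm : amem (agetD sp "class" "Unknown")
      (if amem (agetD sp "class" "Unknown") h then h else aset h (agetD sp "class" "Unknown") []) = true := by
    by_cases hc : amem (agetD sp "class" "Unknown") h
    · simp [hc]
    · simp [hc, amem_aset_self]
  simpa only [ins1] using tail_eq _ _ _ _ _ hm

set_option maxHeartbeats 1000000 in
theorem build_eq (l : List (List (String × String))) :
    build_taxonomic_hierarchy l = build_taxonomic_hierarchy_alt l := by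
  unfold build_taxonomic_hierarchy build_taxonomic_hierarchy_alt
  induction l using List.reverseRecOn with
  | nil => rfl
  | append_singleton l x ih =>
    rw [List.foldl_append, ih, List.map_append]
    exact (step_eq _ x).trans (ins1_hier _ _ _ _ _)

-- ===== VERDICT (by name: the statement is the Claim_ definition above) =====
theorem build_taxonomic_hierarchy_spec : Claim_equal_build_taxonomic_hierarchy := by
  intro species_data _
  unfold Spec_build_taxonomic_hierarchy
  exact build_eq species_data
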